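-- pv_equiv track=rewrite | github.com/harvard-edge/cs249r_book | book/tools/scripts/glossary/build_global_glossary.py | find_best_definition
-- ===== SOURCE A (Python) =====
-- def find_best_definition(definitions_with_chapters):
--     """Find the best definition from multiple chapters."""
--     if len(definitions_with_chapters) == 1:
--         return definitions_with_chapters[0]['definition']
--
--     # Prefer definitions that are:
--     # 1. From primary/core chapters (training, dl_primer, etc.)
--     # 2. Longer and more comprehensive
--     # 3. Don't have "Alternative definition:" artifacts
--
--     priority_chapters = ['dl_primer', 'training', 'ml_systems', 'dnn_architectures']
--
--     # First try priority chapters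
--     for chapter in priority_chapters:
--         for item in definitions_with_chapters:
--             if item['chapter'] == chapter:
--                 definition = item['definition']
--                 if not definition.startswith('Alternative definition:'):
--                     return definition
--
--     # Otherwise, pick the longest clean definition
--     clean_definitions = []
--     for item in definitions_with_chapters:
--         def_text = item['definition']
--         # Take the first part before "Alternative definition:" if it exists
--         if 'Alternative definition:' in def_text:
--             def_text = def_text.split('Alternative definition:')[0].strip()
--         clean_definitions.append((def_text, item['chapter']))
--
--     # Return the longest definition
--     best_def = max(clean_definitions, key=lambda x: len(x[0]))
--     return best_def[0].rstrip('.')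
-- ===== SOURCE B (Python) =====
-- def find_best_definition(definitions_with_chapters):
--     """Find the best definition from multiple chapters."""
--     if len(definitions_with_chapters) == 1:
--         return definitions_with_chapters[0]['definition']
--
--     priority_chapters = ['dl_primer', 'training', 'ml_systems', 'dnn_architectures']
--
--     # Reduce the whole selection to ONE min over a lexicographic rank:
--     # an item from a priority chapter whose definition is not an
--     # "Alternative definition:" artifact gets rank (chapter priority, 0);
--     # every other item competes only as fallback, with rank
--     # (4, -len(clean text)).  min() keeps the first item on ties, which is
--     # exactly the first-in-list preference of both selection stages.
--     ranked = []
--     for item in definitions_with_chapters: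
--         definition = item['definition']
--         chapter = item['chapter']
--         if chapter in priority_chapters and not definition.startswith('Alternative definition:'):
--             ranked.append((priority_chapters.index(chapter), 0, definition))
--         else:
--             text = definition
--             if 'Alternative definition:' in text:
--                 text = text.split('Alternative definition:')[0].strip()
--             ranked.append((4, -len(text), text.rstrip('.')))
--     return min(ranked, key=lambda r: (r[0], r[1]))[2]
-- ===== Notes on version B (the rewrite author's own statement) =====
-- stated objective: alternative
-- what changed: B replaces A's staged selection (four sequential priority-chapter scans followed by building a cleaned list and taking max by length) with a single ranking pass that assigns each item one lexicographic key ((priority index, 0) for eligible priority items, (4, -len(clean text)) for the rest) and returns the value of the unique min.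
import Mathlib
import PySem

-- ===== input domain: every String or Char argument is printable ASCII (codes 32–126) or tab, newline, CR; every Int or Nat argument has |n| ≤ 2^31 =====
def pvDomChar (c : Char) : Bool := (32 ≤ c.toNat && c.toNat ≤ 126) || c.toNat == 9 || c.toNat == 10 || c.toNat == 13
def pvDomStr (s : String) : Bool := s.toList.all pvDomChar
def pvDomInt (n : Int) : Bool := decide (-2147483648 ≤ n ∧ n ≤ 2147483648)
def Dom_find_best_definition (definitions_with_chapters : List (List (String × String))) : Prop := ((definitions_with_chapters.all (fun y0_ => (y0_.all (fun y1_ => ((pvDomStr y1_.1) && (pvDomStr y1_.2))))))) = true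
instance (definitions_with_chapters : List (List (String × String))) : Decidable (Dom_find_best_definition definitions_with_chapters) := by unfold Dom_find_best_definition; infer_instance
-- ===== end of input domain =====

-- B replaces A's staged selection (four priority scans, then max over a rebuilt list) by ONE
-- lexicographic-rank min over the items (objective: alternative; equivalence proved below).


-- shared micro-helpers (identical micro-steps of the two Pythons)
-- item['k']: first-match association lookup; under Pre_ the key is present wherever either
-- Python reads it, so the '' default is never produced and the lookup is exact
def pvDget (item : List (String × String)) (k : String) : String :=
  (List.lookup k item).getD ""

-- exact hand port of s.rstrip('.'): remove trailing '.' characters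
def pvRstripDot (s : String) : String :=
  String.ofList (s.toList.reverse.dropWhile (fun c => c == '.')).reverse

-- the cleaning step both Pythons share:
-- if 'Alternative definition:' in t: t = t.split('Alternative definition:')[0].strip()
def pvClean (t : String) : String :=
  if PySem.Str.isIn "Alternative definition:" t then
    PySem.Str.strip (PySem.List.pyGetD ((PySem.Str.split? t "Alternative definition:").getD []) 0 "")
  else t

def pvPriority : List String := ["dl_primer", "training", "ml_systems", "dnn_architectures"]

-- ===== PORT A =====
-- inner loop of A: scan ALL items for one chapter, return first non-alternative definition
def pvScanItems (items : List (List (String × String))) (chapter : String) : Option String :=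
  match items with
  | [] => none
  | item :: rest =>
    if pvDget item "chapter" = chapter then
      if PySem.Str.startswith (pvDget item "definition") "Alternative definition:" then
        pvScanItems rest chapter
      else some (pvDget item "definition")
    else pvScanItems rest chapter

-- outer loop of A over the priority chapters
def pvScanPriority (items : List (List (String × String))) : List String → Option String
  | [] => none
  | c :: cs =>
    match pvScanItems items c with
    | some d => some d
    | none => pvScanPriority items cs

def find_best_definition (definitions_with_chapters : List (List (String × String))) : String :=
  if definitions_with_chapters.length = 1 then
    pvDget (definitions_with_chapters.headD []) "definition"
  else
    match pvScanPriority definitions_with_chapters pvPriority with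
    | some definition => definition
    | none =>
      -- clean_definitions is built and consumed in place
      match PySem.List.max? (definitions_with_chapters.map
          (fun item => (pvClean (pvDget item "definition"), pvDget item "chapter")))
          (fun x => PySem.Str.len x.1) with
      | some best => pvRstripDot best.1
      | none => ""  -- unreachable under Pre_: Python raises ValueError on the empty list

-- ===== PORT B =====
-- B's ranking pass: an eligible priority item gets rank (chapter priority, 0) and carries its raw
-- definition; every other item gets rank (4, -len(clean text)) and carries the cleaned '.'-stripped text
def pvRanked (item : List (String × String)) : Int × Int × String :=
  let definition := pvDget item "definition"
  let chapter := pvDget item "chapter"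
  if pvPriority.contains chapter && !(PySem.Str.startswith definition "Alternative definition:") then
    ((((PySem.List.index? pvPriority chapter).getD 0 : Nat) : Int), 0, definition)
  else
    let text := pvClean definition
    (4, -(PySem.Str.len text), pvRstripDot text)

def find_best_definition_alt (definitions_with_chapters : List (List (String × String))) : String :=
  if definitions_with_chapters.length = 1 then
    pvDget (definitions_with_chapters.headD []) "definition"
  else
    -- min(ranked, key=lambda r: (r[0], r[1]))[2]; min keeps the FIRST extremal element
    match PySem.List.min2? (definitions_with_chapters.map pvRanked)
        (fun r => r.1) (fun r => r.2.1) with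
    | some r => r.2.2
    | none => ""  -- unreachable under Pre_: Python's min raises ValueError on the empty list

-- ===== PRECONDITION & SPEC =====
-- Pre_ requires every record to carry the keys A may read ('definition'; 'chapter' except in the
-- single-item early return), because a missing key makes Python A raise KeyError (and the empty
-- list ValueError) depending on how far its scans get; B's single ranking pass reads both keys
-- of every item up front, so on the excluded corner where A happens to return early before
-- reaching an item's missing key, B raises KeyError itself.
def Pre_find_best_definition (definitions_with_chapters : List (List (String × String))) : Prop :=
  definitions_with_chapters ≠ [] ∧
  (∀ item ∈ definitions_with_chapters, "definition" ∈ item.map Prod.fst) ∧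
  (definitions_with_chapters.length = 1 ∨
    ∀ item ∈ definitions_with_chapters, "chapter" ∈ item.map Prod.fst)
instance (definitions_with_chapters : List (List (String × String))) : Decidable (Pre_find_best_definition definitions_with_chapters) := by
  unfold Pre_find_best_definition; infer_instance

def pvWitness_find_best_definition : (List (List (String × String))) :=
  [[("chapter", "intro"), ("definition", "A model maps inputs to outputs.")],
   [("chapter", "training"), ("definition", "Training fits parameters to data.")]]

def Spec_find_best_definition (definitions_with_chapters : List (List (String × String))) (out : String) : Prop := out = find_best_definition_alt definitions_with_chapters
instance (definitions_with_chapters : List (List (String × String))) (out : String) : Decidable (Spec_find_best_definition definitions_with_chapters out) := by unfold Spec_find_best_definition; infer_instance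

-- ===== CLAIM (what is proved, stated in full; the proofs are below) =====
def Claim_equal_find_best_definition : Prop := ∀ (definitions_with_chapters : List (List (String × String))), Dom_find_best_definition definitions_with_chapters → Pre_find_best_definition definitions_with_chapters → Spec_find_best_definition definitions_with_chapters (find_best_definition definitions_with_chapters)

-- ===== LEMMAS AND PROOFS =====

-- abbreviations for the item attributes used by the proofs
def pvCh (item : List (String × String)) : String := pvDget item "chapter"
def pvDf (item : List (String × String)) : String := pvDget item "definition"
def pvStarts (item : List (String × String)) : Bool :=
  PySem.Str.startswith (pvDf item) "Alternative definition:"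
def pvElig (item : List (String × String)) : Bool :=
  pvPriority.contains (pvCh item) && !pvStarts item

-- B's min2? step function (the fold of PySem.List.min2? specialised to our keys)
def pvStep (acc : Option (Int × Int × String)) (x : Int × Int × String) : Option (Int × Int × String) :=
  match acc with
  | none => some x
  | some m => if (decide (x.1 < m.1) || !decide (m.1 < x.1) && decide (x.2.1 < m.2.1)) = true then some x else some m

theorem min2?_eq_foldl_pvStep (xs : List (Int × Int × String)) :
    PySem.List.min2? xs (fun r => r.1) (fun r => r.2.1) = xs.foldl pvStep none := by
  unfold PySem.List.min2?
  congr 1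
  funext acc x
  cases acc <;> rfl

-- the fold keeps the accumulator or picks an element of the list
theorem foldl_pvStep_mem (xs : List (Int × Int × String)) :
    ∀ (a : Option (Int × Int × String)),
      xs.foldl pvStep a = a ∨ ∃ m ∈ xs, xs.foldl pvStep a = some m := by
  induction xs with
  | nil => intro a; exact Or.inl rfl
  | cons x t ih =>
    intro a
    rcases ih (pvStep a x) with h | ⟨m, hm, h⟩
    · have hx : pvStep a x = a ∨ pvStep a x = some x := by
        cases a with
        | none => exact Or.inr rfl
        | some m => simp only [pvStep]; split_ifs <;> simp
      rcases hx with hx | hx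
      · rw [hx] at h; exact Or.inl (by rw [List.foldl_cons, hx, h])
      · rw [hx] at h
        exact Or.inr ⟨x, List.mem_cons_self, by rw [List.foldl_cons, hx, h]⟩
    · exact Or.inr ⟨m, List.mem_cons_of_mem _ hm, by rw [List.foldl_cons]; exact h⟩

-- once the (first) lexicographically least element is the accumulator it survives the rest
theorem foldl_pvStep_keep (x : Int × Int × String) (zs : List (Int × Int × String))
    (hz : ∀ z ∈ zs, x.1 < z.1 ∨ (x.1 = z.1 ∧ x.2.1 ≤ z.2.1)) :
    zs.foldl pvStep (some x) = some x := by
  induction zs with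
  | nil => rfl
  | cons z t ih =>
    have hzx : pvStep (some x) z = some x := by
      have hcond : ¬((decide (z.1 < x.1) || !decide (x.1 < z.1) && decide (z.2.1 < x.2.1)) = true) := by
        rcases hz z List.mem_cons_self with h | ⟨h1, h2⟩ <;> simp <;> omega
      simp only [pvStep]
      rw [if_neg hcond]
    simp only [List.foldl_cons, hzx]
    exact ih (fun z hzm => hz z (List.mem_cons_of_mem _ hzm))

-- the first lexicographically minimal element wins the whole min2? fold
theorem min2?_first (ys zs : List (Int × Int × String)) (x : Int × Int × String)
    (hy : ∀ y ∈ ys, x.1 < y.1 ∨ (x.1 = y.1 ∧ x.2.1 < y.2.1))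
    (hz : ∀ z ∈ zs, x.1 < z.1 ∨ (x.1 = z.1 ∧ x.2.1 ≤ z.2.1)) :
    PySem.List.min2? (ys ++ x :: zs) (fun r => r.1) (fun r => r.2.1) = some x := by
  rw [min2?_eq_foldl_pvStep, List.foldl_append]
  have hacc : pvStep (ys.foldl pvStep none) x = some x := by
    rcases foldl_pvStep_mem ys none with h | ⟨m, hm, h⟩
    · rw [h]; rfl
    · rw [h]
      have hcond : (decide (x.1 < m.1) || !decide (m.1 < x.1) && decide (x.2.1 < m.2.1)) = true := by
        rcases hy m hm with hlt | ⟨h1, h2⟩ <;> simp <;> omega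
      simp only [pvStep]
      rw [if_pos hcond]
  simp only [List.foldl_cons, hacc]
  exact foldl_pvStep_keep x zs hz

-- characterisation of A's inner scan returning a value: the list splits at the FIRST item of
-- that chapter with a non-alternative definition
theorem pvScanItems_some (c : String) (l : List (List (String × String)))
    (d : String) (h : pvScanItems l c = some d) :
    ∃ ys item zs, l = ys ++ item :: zs ∧
      (∀ y ∈ ys, ¬(pvCh y = c ∧ pvStarts y = false)) ∧
      pvCh item = c ∧ pvStarts item = false ∧ d = pvDf item := by
  induction l with
  | nil => simp [pvScanItems] at h
  | cons item rest ih =>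
    unfold pvScanItems at h
    by_cases hc : pvDget item "chapter" = c
    · rw [if_pos hc] at h
      by_cases hs : PySem.Str.startswith (pvDget item "definition") "Alternative definition:" = true
      · rw [if_pos hs] at h
        obtain ⟨ys, it, zs, hsplit, hys, h1, h2, h3⟩ := ih h
        refine ⟨item :: ys, it, zs, by rw [hsplit]; rfl, ?_, h1, h2, h3⟩
        intro y hy
        rcases List.mem_cons.mp hy with rfl | hy'
        · rintro ⟨_, hf⟩
          rw [show pvStarts y = PySem.Str.startswith (pvDget y "definition") "Alternative definition:" from rfl] at hf
          rw [hs] at hf; exact absurd hf (by simp)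
        · exact hys y hy'
      · rw [if_neg hs] at h
        exact ⟨[], item, rest, rfl, by simp, hc, by simpa [pvStarts, pvDf] using hs,
          by simpa [pvDf] using h.symm⟩
    · rw [if_neg hc] at h
      obtain ⟨ys, it, zs, hsplit, hys, h1, h2, h3⟩ := ih h
      refine ⟨item :: ys, it, zs, by rw [hsplit]; rfl, ?_, h1, h2, h3⟩
      intro y hy
      rcases List.mem_cons.mp hy with rfl | hy'
      · rintro ⟨hf, _⟩; exact hc hf
      · exact hys y hy'

-- A's inner scan returning none: every item of that chapter has an alternative-prefixed definition
theorem pvScanItems_none (c : String) (l : List (List (String × String)))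
    (h : pvScanItems l c = none) :
    ∀ item ∈ l, pvCh item = c → pvStarts item = true := by
  induction l with
  | nil => simp
  | cons item rest ih =>
    intro it hit hch
    unfold pvScanItems at h
    by_cases hc : pvDget item "chapter" = c
    · rw [if_pos hc] at h
      by_cases hs : PySem.Str.startswith (pvDget item "definition") "Alternative definition:" = true
      · rw [if_pos hs] at h
        rcases List.mem_cons.mp hit with rfl | hit'
        · simpa [pvStarts, pvDf] using hs
        · exact ih h it hit' hch
      · rw [if_neg hs] at h; exact absurd h (by simp)
    · rw [if_neg hc] at h
      rcases List.mem_cons.mp hit with rfl | hit'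
      · exact absurd hch hc
      · exact ih h it hit' hch

-- A's outer scan returning a value: the chapter list splits at the first chapter whose scan hits
theorem pvScanPriority_some (l : List (List (String × String))) (cs : List String)
    (d : String) (h : pvScanPriority l cs = some d) :
    ∃ cs1 c cs2, cs = cs1 ++ c :: cs2 ∧
      (∀ c' ∈ cs1, pvScanItems l c' = none) ∧ pvScanItems l c = some d := by
  induction cs with
  | nil => simp [pvScanPriority] at h
  | cons c cs ih =>
    unfold pvScanPriority at h
    cases hs : pvScanItems l c with
    | some d' =>
      rw [hs] at h
      exact ⟨[], c, cs, rfl, by simp, by rw [hs]; exact h⟩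
    | none =>
      rw [hs] at h
      obtain ⟨cs1, c', cs2, h1, h2, h3⟩ := ih h
      refine ⟨c :: cs1, c', cs2, by rw [h1]; rfl, ?_, h3⟩
      intro x hx
      rcases List.mem_cons.mp hx with rfl | hx'
      · exact hs
      · exact h2 x hx'

-- A's outer scan returning none on any chapter list: no item is eligible for any of its chapters
theorem pvScanPriority_none (l : List (List (String × String))) (cs : List String)
    (h : pvScanPriority l cs = none) :
    ∀ c ∈ cs, pvScanItems l c = none := by
  induction cs with
  | nil => simp
  | cons c0 cs0 ih =>
    intro c' hc'
    unfold pvScanPriority at h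
    cases hs : pvScanItems l c0 with
    | some d => rw [hs] at h; exact absurd h (by simp)
    | none =>
      rw [hs] at h
      rcases List.mem_cons.mp hc' with rfl | hc''
      · exact hs
      · exact ih h c' hc''

-- no eligible item anywhere when the whole priority scan misses
theorem pvScanPriority_none_inelig (l : List (List (String × String)))
    (h : pvScanPriority l pvPriority = none) :
    ∀ item ∈ l, pvElig item = false := by
  intro item hit
  unfold pvElig
  cases hc : pvPriority.contains (pvCh item) with
  | false => simp
  | true =>
    have hin : pvCh item ∈ pvPriority := by simpa using hc
    have hs := pvScanItems_none (pvCh item) l (pvScanPriority_none l pvPriority h _ hin) item hit rfl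
    simp [hs]

-- the simulation map between A's fallback pairs and B's fallback triples
def pvPhi (p : String × String) : Int × Int × String :=
  (4, -(PySem.Str.len p.1), pvRstripDot p.1)

-- A's running-max fold (the fold of PySem.List.max? with the length key)
def pvStepA (acc : Option (String × String)) (x : String × String) : Option (String × String) :=
  match acc with
  | none => some x
  | some m => if PySem.Str.len m.1 < PySem.Str.len x.1 then some x else some m

theorem max?_eq_foldl_pvStepA (xs : List (String × String)) :
    PySem.List.max? xs (fun x => PySem.Str.len x.1) = xs.foldl pvStepA none := by
  unfold PySem.List.max?
  congr 1
  funext acc x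
  cases acc <;> rfl

-- B's min-fold over φ-images simulates A's max-fold
theorem foldl_pvStep_phi (ps : List (String × String)) :
    ∀ (a : Option (String × String)),
      (ps.map pvPhi).foldl pvStep (Option.map pvPhi a)
        = Option.map pvPhi (ps.foldl pvStepA a) := by
  induction ps with
  | nil => intro a; rfl
  | cons p t ih =>
    intro a
    have hstep : pvStep (Option.map pvPhi a) (pvPhi p) = Option.map pvPhi (pvStepA a p) := by
      cases a with
      | none => rfl
      | some m =>
        simp only [Option.map_some, pvStep, pvStepA, pvPhi]
        by_cases hlen : PySem.Str.len m.1 < PySem.Str.len p.1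
        · rw [if_pos hlen, if_pos (by simp at hlen ⊢; omega)]
          simp [pvPhi]
        · rw [if_neg hlen, if_neg (by simp at hlen ⊢; omega)]
          simp [pvPhi]
    simp only [List.map_cons, List.foldl_cons, hstep]
    exact ih (pvStepA a p)

theorem pvRanked_elig (w : List (String × String)) (hw : pvElig w = true) :
    ∃ rw : Nat, PySem.List.index? pvPriority (pvCh w) = some rw ∧
      pvRanked w = ((rw : Int), 0, pvDf w) := by
  have hmem : pvCh w ∈ pvPriority := by
    have := (Bool.and_eq_true _ _).mp hw
    simpa using this.1
  obtain ⟨rw, hrw⟩ := Option.isSome_iff_exists.mp ((PySem.List.index?_isSome_iff _ _).mpr hmem)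
  refine ⟨rw, hrw, ?_⟩
  simp only [pvRanked]
  rw [show (pvPriority.contains (pvDget w "chapter") &&
      !(PySem.Str.startswith (pvDget w "definition") "Alternative definition:")) = true from hw]
  simp only [pvCh] at hrw
  rw [hrw]
  simp [pvDf]

-- an ineligible item's B-rank is the fallback triple
theorem pvRanked_inelig (w : List (String × String)) (hw : pvElig w = false) :
    pvRanked w = pvPhi (pvClean (pvDget w "definition"), pvDget w "chapter") := by
  simp only [pvRanked, pvPhi]
  rw [show (pvPriority.contains (pvDget w "chapter") &&
      !(PySem.Str.startswith (pvDget w "definition") "Alternative definition:")) = false from hw]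
  simp

-- when no item is eligible, B's min over (4, -len) keys is A's first longest clean definition
theorem fallback_eq (l : List (List (String × String)))
    (hinelig : ∀ item ∈ l, pvElig item = false) :
    PySem.List.min2? (l.map pvRanked) (fun r => r.1) (fun r => r.2.1)
      = Option.map pvPhi (PySem.List.max?
          (l.map (fun item => (pvClean (pvDget item "definition"), pvDget item "chapter")))
          (fun x => PySem.Str.len x.1)) := by
  have hmap : l.map pvRanked
      = (l.map (fun item => (pvClean (pvDget item "definition"), pvDget item "chapter"))).map pvPhi := by
    rw [List.map_map]
    refine List.map_congr_left ?_
    intro item hit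
    exact pvRanked_inelig item (hinelig item hit)
  rw [hmap, min2?_eq_foldl_pvStep, max?_eq_foldl_pvStepA]
  exact foldl_pvStep_phi _ none

-- the priority list is duplicate-free and four long
theorem pvPriority_nodup : pvPriority.Nodup := by decide
theorem pvPriority_length : pvPriority.length = 4 := rfl

theorem main_eq (l : List (List (String × String))) :
    find_best_definition l = find_best_definition_alt l := by
  unfold find_best_definition find_best_definition_alt
  by_cases h1 : l.length = 1
  · rw [if_pos h1, if_pos h1]
  · rw [if_neg h1, if_neg h1]
    cases hscan : pvScanPriority l pvPriority with
    | none =>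
      -- fallback case: no eligible item anywhere
      rw [fallback_eq l (pvScanPriority_none_inelig l hscan)]
      cases hmax : PySem.List.max? (l.map (fun item => (pvClean (pvDget item "definition"), pvDget item "chapter"))) (fun x => PySem.Str.len x.1) with
      | none => rfl
      | some best => rfl
    | some d =>
      -- priority case: A returns the definition of the first eligible item of the first
      -- priority chapter that has one; that item is the unique lexicographic-rank minimum
      obtain ⟨cs1, c, cs2, hcs, hnone, hsome⟩ := pvScanPriority_some l pvPriority d hscan
      obtain ⟨ys, item, zs, hsplit, hys, hch, hst, hd⟩ := pvScanItems_some c l d hsome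
      have hclen : cs1.length < 4 := by
        have h4 := pvPriority_length
        rw [hcs] at h4
        simp only [List.length_append, List.length_cons] at h4
        omega
      have hnd := pvPriority_nodup
      rw [hcs] at hnd
      have hcnot : c ∉ cs1 := fun hmem =>
        (List.disjoint_of_nodup_append hnd) hmem List.mem_cons_self
      have hcmem : c ∈ pvPriority := by
        rw [hcs]; exact List.mem_append_right _ List.mem_cons_self
      have hidx : PySem.List.index? pvPriority c = some cs1.length := by
        rw [PySem.List.index?_eq_some_iff]
        exact ⟨cs1, cs2, hcs, rfl, hcnot⟩
      -- every eligible item of l has priority index at least cs1.length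
      have hlow : ∀ w ∈ l, pvElig w = true →
          ∀ rw : Nat, PySem.List.index? pvPriority (pvCh w) = some rw → cs1.length ≤ rw := by
        intro w hwl hw rw hrw
        by_contra hlt
        push Not at hlt
        rw [hcs] at hrw
        obtain ⟨hk, hget, -⟩ := PySem.List.getElem_of_index?_eq_some hrw
        have hin : pvCh w ∈ cs1 := by
          rw [List.getElem_append_left hlt] at hget
          rw [← hget]
          exact List.getElem_mem _
        have hstw := pvScanItems_none (pvCh w) l (hnone _ hin) w hwl rfl
        have helig := (Bool.and_eq_true _ _).mp hw
        rw [hstw] at helig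
        exact absurd helig.2 (by simp)
      -- priority index cs1.length means chapter c
      have hat : ∀ w, PySem.List.index? pvPriority (pvCh w) = some cs1.length → pvCh w = c := by
        intro w hrw
        rw [hcs] at hrw
        obtain ⟨hk, hget, -⟩ := PySem.List.getElem_of_index?_eq_some hrw
        rw [List.getElem_append_right (le_refl _)] at hget
        simpa using hget.symm
      have hitem : pvElig item = true := by
        unfold pvElig
        rw [hch, hst]
        simp [hcmem]
      have hx : pvRanked item = ((cs1.length : Int), 0, d) := by
        obtain ⟨rw, hrw, hval⟩ := pvRanked_elig item hitem
        rw [hch, hidx] at hrw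
        cases hrw
        rw [hval, hd]
      -- bound an arbitrary element of the list against the winner
      have hbound : ∀ w ∈ l, (pvRanked item).1 < (pvRanked w).1 ∨
          ((pvRanked item).1 = (pvRanked w).1 ∧ (pvRanked item).2.1 ≤ (pvRanked w).2.1) := by
        intro w hwl
        cases helig : pvElig w with
        | false =>
          rw [pvRanked_inelig w helig, hx]
          left
          show (cs1.length : Int) < (4 : Int)
          omega
        | true =>
          obtain ⟨rw, hrw, hval⟩ := pvRanked_elig w helig
          have hge := hlow w hwl helig rw hrw
          rw [hval, hx]
          show (cs1.length : Int) < (rw : Int) ∨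
            ((cs1.length : Int) = (rw : Int) ∧ (0 : Int) ≤ (0 : Int))
          omega
      -- strictness for the earlier items: an equal rank would contradict "first match"
      have hstrict : ∀ y ∈ ys, (pvRanked item).1 < (pvRanked y).1 ∨
          ((pvRanked item).1 = (pvRanked y).1 ∧ (pvRanked item).2.1 < (pvRanked y).2.1) := by
        intro y hyys
        have hyl : y ∈ l := by rw [hsplit]; exact List.mem_append_left _ hyys
        cases helig : pvElig y with
        | false =>
          rw [pvRanked_inelig y helig, hx]
          left
          show (cs1.length : Int) < (4 : Int)
          omega
        | true =>
          obtain ⟨rw, hrw, hval⟩ := pvRanked_elig y helig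
          have hge := hlow y hyl helig rw hrw
          have hne : rw ≠ cs1.length := by
            intro heq
            rw [heq] at hrw
            have hcy := hat y hrw
            have hns : pvStarts y = false := by
              have := (Bool.and_eq_true _ _).mp helig
              simpa using this.2
            exact hys y hyys ⟨hcy, hns⟩
          rw [hval, hx]
          left
          show (cs1.length : Int) < (rw : Int)
          omega
      conv_rhs => rw [hsplit, List.map_append, List.map_cons]
      rw [min2?_first (ys.map pvRanked) (zs.map pvRanked) (pvRanked item)
        (by intro Y hY; obtain ⟨y, hy', rfl⟩ := List.mem_map.mp hY; exact hstrict y hy')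
        (by intro Z hZ; obtain ⟨z, hz', rfl⟩ := List.mem_map.mp hZ
            exact hbound z (by rw [hsplit]; exact List.mem_append_right _ (List.mem_cons_of_mem _ hz')))]
      rw [hx]

-- ===== VERDICT (by name: the statement is the Claim_ definition above) =====
theorem find_best_definition_spec : Claim_equal_find_best_definition := by
  intro l _ _
  unfold Spec_find_best_definition
  exact main_eq l
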